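-- pv_equiv track=rewrite | github.com/sskhan67/GPGPU-Programming- | QODE/Applications/GPU-pilot/attic/biorthogonal_Hamiltonian.py | two_body_num_elec_pairs
-- ===== SOURCE A (Python) =====
-- def two_body_num_elec_pairs(num_elec1, num_elec2): # num_elec is naturally sorted
-- 	lo1 = min(num_elec1)
-- 	hi1 = max(num_elec1)
-- 	lo2 = min(num_elec2)
-- 	hi2 = max(num_elec2)
-- 	num_elec_two_body = []
-- 	possible_pairs = []
-- 	for n_elec in range(lo1+lo2, hi1+hi2+1):
-- 		tmp = []
-- 		for n1 in num_elec1: # This is very generic, it fits discrete numbers of electrons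
-- 			n2 = n_elec - n1
-- 			if n2 in num_elec2:
-- 				tmp.append( (n1,n2) )
-- 		if tmp:
-- 			num_elec_two_body.append(n_elec)
-- 			possible_pairs.append( list(tmp) )
-- 	return possible_pairs, num_elec_two_body
-- ===== SOURCE B (Python) =====
-- def two_body_num_elec_pairs(num_elec1, num_elec2):
--     vals2 = list(dict.fromkeys(num_elec2))  # distinct values of num_elec2, first occurrences
--     buckets = {}
--     for n1 in num_elec1:
--         for n2 in vals2:
--             buckets.setdefault(n1 + n2, []).append((n1, n2))
--     sums = sorted(buckets)
--     return [buckets[s] for s in sums], sums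
-- ===== Notes on version B (the rewrite author's own statement) =====
-- stated objective: faster
-- what changed: B builds a dict of pair-buckets keyed by sum in one pass over num_elec1 x set(num_elec2) and sorts the keys, instead of A's rescan of num_elec1 with a list-membership test in num_elec2 for every candidate sum in range(min1+min2, max1+max2+1).
import Mathlib
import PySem

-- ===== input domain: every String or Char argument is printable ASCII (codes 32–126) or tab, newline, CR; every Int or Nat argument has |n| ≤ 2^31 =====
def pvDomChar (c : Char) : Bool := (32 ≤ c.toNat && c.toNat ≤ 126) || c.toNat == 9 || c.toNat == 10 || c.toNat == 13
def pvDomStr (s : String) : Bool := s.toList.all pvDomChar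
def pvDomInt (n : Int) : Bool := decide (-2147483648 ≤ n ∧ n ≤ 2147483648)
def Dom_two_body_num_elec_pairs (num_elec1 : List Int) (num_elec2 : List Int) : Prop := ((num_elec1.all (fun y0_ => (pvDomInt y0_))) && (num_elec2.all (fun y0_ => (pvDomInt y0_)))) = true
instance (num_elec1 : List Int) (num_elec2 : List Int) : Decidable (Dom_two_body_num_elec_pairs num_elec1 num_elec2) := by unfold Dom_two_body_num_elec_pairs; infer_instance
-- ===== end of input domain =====

-- B groups the pairs by their sum with one dict-building pass over num_elec1 × set(num_elec2)
-- instead of A's scan of num_elec1 (with a list-membership test) for every candidate sum: faster.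


-- ===== PORT A =====
-- inner loop of A: the list `tmp` built over num_elec1 for one candidate sum n_elec
def pvTmpA (num_elec1 : List Int) (num_elec2 : List Int) (n_elec : Int) : List (Int × Int) :=
  num_elec1.foldl (fun tmp n1 =>
    let n2 := n_elec - n1
    if n2 ∈ num_elec2 then tmp ++ [(n1, n2)] else tmp) []

def two_body_num_elec_pairs (num_elec1 : List Int) (num_elec2 : List Int) : (List (List (Int × Int))) × List Int :=
  match PySem.List.min? num_elec1 (fun x => x), PySem.List.max? num_elec1 (fun x => x),
        PySem.List.min? num_elec2 (fun x => x), PySem.List.max? num_elec2 (fun x => x) with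
  | some lo1, some hi1, some lo2, some hi2 =>
      let st := (PySem.List.pyRange (lo1 + lo2) (hi1 + hi2 + 1)).foldl
        (fun (acc : List (List (Int × Int)) × List Int) n_elec =>
          let tmp := pvTmpA num_elec1 num_elec2 n_elec
          if tmp ≠ [] then (acc.1 ++ [tmp], acc.2 ++ [n_elec]) else acc)
        ([], [])
      (st.1, st.2)
  | _, _, _, _ => ([], [])  -- unreachable under Pre_: Python's min/max raise ValueError on an empty list

-- ===== PORT B =====
def two_body_num_elec_pairs_alt (num_elec1 : List Int) (num_elec2 : List Int) : (List (List (Int × Int))) × List Int :=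
  let vals2 := PySem.List.dedup num_elec2                    -- list(dict.fromkeys(num_elec2))
  let buckets : PySem.Dict Int (List (Int × Int)) :=
    num_elec1.foldl (fun d n1 =>
      vals2.foldl (fun d n2 => d.modify (n1 + n2) [] (fun l => l ++ [(n1, n2)])) d)
      PySem.Dict.empty                                       -- buckets.setdefault(n1+n2, []).append((n1, n2))
  let sums := PySem.List.sorted buckets.keys (fun s => s)
  (sums.map (fun s => buckets.getD s []), sums)              -- buckets[s]: exact, every s ∈ sums is a key

-- ===== PRECONDITION & SPEC =====
-- A calls min/max on both lists, which raise ValueError on an empty list; Pre_ excludes exactly that.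
def Pre_two_body_num_elec_pairs (num_elec1 : List Int) (num_elec2 : List Int) : Prop :=
  num_elec1 ≠ [] ∧ num_elec2 ≠ []
instance (num_elec1 : List Int) (num_elec2 : List Int) : Decidable (Pre_two_body_num_elec_pairs num_elec1 num_elec2) := by unfold Pre_two_body_num_elec_pairs; infer_instance
def pvWitness_two_body_num_elec_pairs : List Int × List Int := ([0, 2], [0, 2])

def Spec_two_body_num_elec_pairs (num_elec1 : List Int) (num_elec2 : List Int) (out : (List (List (Int × Int))) × List Int) : Prop := out = two_body_num_elec_pairs_alt num_elec1 num_elec2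
instance (num_elec1 : List Int) (num_elec2 : List Int) (out : (List (List (Int × Int))) × List Int) : Decidable (Spec_two_body_num_elec_pairs num_elec1 num_elec2 out) := by unfold Spec_two_body_num_elec_pairs; infer_instance

-- ===== CLAIM (what is proved, stated in full; the proofs are below) =====
def Claim_equal_two_body_num_elec_pairs : Prop := ∀ (num_elec1 : List Int) (num_elec2 : List Int), Dom_two_body_num_elec_pairs num_elec1 num_elec2 → Pre_two_body_num_elec_pairs num_elec1 num_elec2 → Spec_two_body_num_elec_pairs num_elec1 num_elec2 (two_body_num_elec_pairs num_elec1 num_elec2)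

-- ===== LEMMAS AND PROOFS =====

-- the pairs of sum s, in num_elec1 order: the common mathematical content of both programs
def pvSumPairs (num_elec1 : List Int) (num_elec2 : List Int) (s : Int) : List (Int × Int) :=
  (num_elec1.filter (fun n1 => decide ((s - n1) ∈ num_elec2))).map (fun n1 => (n1, s - n1))

theorem pvTmpA_eq (num_elec1 num_elec2 : List Int) (s : Int) :
    pvTmpA num_elec1 num_elec2 s = pvSumPairs num_elec1 num_elec2 s := by
  have h := PySem.List.foldl_append_if (fun n1 => decide ((s - n1) ∈ num_elec2))
      (fun n1 => (n1, s - n1)) num_elec1 []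
  unfold pvTmpA pvSumPairs
  simpa using h

-- A's outer loop with its pair of accumulators, in closed form
theorem pvFoldlPairs (g : Int → List (Int × Int)) (l : List Int)
    (xs : List (List (Int × Int))) (ys : List Int) :
    l.foldl (fun acc s => if g s ≠ [] then (acc.1 ++ [g s], acc.2 ++ [s]) else acc) (xs, ys)
      = (xs ++ (l.filter (fun s => !(g s).isEmpty)).map g,
         ys ++ l.filter (fun s => !(g s).isEmpty)) := by
  induction l generalizing xs ys with
  | nil => simp
  | cons a t ih =>
    rw [List.foldl_cons]
    by_cases h : g a = []
    · rw [if_neg (by simp [h]), ih]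
      simp [h]
    · rw [if_pos h, ih]
      simp [List.isEmpty_eq_false_iff.mpr h]

-- proof-side flat view of B's nested loop
def pvPairs (num_elec1 vals2 : List Int) : List (Int × (Int × Int)) :=
  num_elec1.flatMap (fun a => vals2.map (fun b => (a + b, (a, b))))

theorem pvNestedFoldl (num_elec1 vals2 : List Int) :
    num_elec1.foldl (fun d n1 =>
        vals2.foldl (fun d n2 => PySem.Dict.modify d (n1 + n2) [] (fun l => l ++ [(n1, n2)])) d)
      (PySem.Dict.empty : PySem.Dict Int (List (Int × Int)))
    = (pvPairs num_elec1 vals2).foldl (fun d p => PySem.Dict.modify d p.1 [] (fun l => l ++ [p.2]))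
        PySem.Dict.empty := by
  unfold pvPairs
  rw [List.foldl_flatMap]
  simp [List.foldl_map]

theorem pvInnerFilter (a s : Int) (ys : List Int) (h : ys.Nodup) :
    ((ys.map (fun b => (a + b, (a, b)))).filter (fun p => p.1 == s)).map (fun p => p.2)
      = if s - a ∈ ys then [(a, s - a)] else [] := by
  induction ys with
  | nil => simp
  | cons b t ih =>
    rcases List.nodup_cons.mp h with ⟨hb, ht⟩
    by_cases hs : a + b = s
    · have hb' : s - a = b := by omega
      simp only [List.filter_cons, List.map_cons, hs, beq_self_eq_true, if_pos, ih ht, hb']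
      simp [hb]
    · have hb' : s - a ≠ b := by omega
      have hf : (a + b == s) = false := by simp [hs]
      simp [hf, ih ht, hb']

theorem pvPairsFilter (num_elec1 num_elec2 vals2 : List Int) (s : Int)
    (hnd : vals2.Nodup) (hm : ∀ x, x ∈ vals2 ↔ x ∈ num_elec2) :
    ((pvPairs num_elec1 vals2).filter (fun p => p.1 == s)).map (fun p => p.2)
      = pvSumPairs num_elec1 num_elec2 s := by
  induction num_elec1 with
  | nil => simp [pvPairs, pvSumPairs]
  | cons a t ih =>
    have hcons : pvPairs (a :: t) vals2
        = (vals2.map (fun b => (a + b, (a, b)))) ++ pvPairs t vals2 := by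
      simp [pvPairs]
    rw [hcons, List.filter_append, List.map_append, pvInnerFilter a s vals2 hnd, ih]
    by_cases hmem : s - a ∈ num_elec2
    · simp [pvSumPairs, hmem, (hm (s - a)).mpr hmem]
    · have : s - a ∉ vals2 := fun hc => hmem ((hm (s - a)).mp hc)
      simp [pvSumPairs, hmem, this]

theorem pvSumPairs_ne_nil_iff (num_elec1 num_elec2 : List Int) (s : Int) :
    pvSumPairs num_elec1 num_elec2 s ≠ [] ↔ ∃ a ∈ num_elec1, s - a ∈ num_elec2 := by
  simp [pvSumPairs, List.filter_eq_nil_iff]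

theorem pvKeysMem (num_elec1 num_elec2 vals2 : List Int) (s : Int)
    (hm : ∀ x, x ∈ vals2 ↔ x ∈ num_elec2) :
    (s ∈ ((pvPairs num_elec1 vals2).foldl
        (fun d p => PySem.Dict.modify d p.1 [] (fun l => l ++ [p.2]))
        (PySem.Dict.empty : PySem.Dict Int (List (Int × Int)))).keys)
      ↔ pvSumPairs num_elec1 num_elec2 s ≠ [] := by
  rw [PySem.Dict.keys_foldl_modify_key (pvPairs num_elec1 vals2) (fun p => p.1) []
      (fun d p => fun l => l ++ [p.2]) PySem.Dict.empty]
  rw [PySem.Dict.keys_empty, pvSumPairs_ne_nil_iff]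
  rw [PySem.Set.mem_update]
  constructor
  · rintro (h | h)
    · simp at h
    · rcases List.mem_map.mp h with ⟨p, hp, rfl⟩
      have hp' : ∃ a ∈ num_elec1, ∃ b ∈ vals2, ((a + b, (a, b)) : Int × (Int × Int)) = p := by
        simpa [pvPairs] using hp
      rcases hp' with ⟨a, ha, b, hbv, rfl⟩
      exact ⟨a, ha, by simpa using (hm b).mp hbv⟩
  · rintro ⟨a, ha, hb⟩
    right
    have hpm : (a + (s - a), (a, s - a)) ∈ pvPairs num_elec1 vals2 := by
      unfold pvPairs
      exact List.mem_flatMap.mpr ⟨a, ha, List.mem_map.mpr ⟨s - a, (hm _).mpr hb, rfl⟩⟩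
    have : s = (fun p : Int × (Int × Int) => p.1) (a + (s - a), (a, s - a)) := by
      simp
    rw [this]
    exact List.mem_map_of_mem hpm

theorem pvKeysNodup (pairs : List (Int × (Int × Int))) :
    ((pairs.foldl (fun d p => PySem.Dict.modify d p.1 [] (fun l => l ++ [p.2]))
        (PySem.Dict.empty : PySem.Dict Int (List (Int × Int)))).keys).Nodup := by
  exact PySem.Dict.nodup_keys_foldl_modify_key pairs (fun p => p.1) []
    (fun d p => fun l => l ++ [p.2]) PySem.Dict.empty (by simp [PySem.Dict.keys_empty])

-- ===== VERDICT (by name: the statement is the Claim_ definition above) =====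
theorem two_body_num_elec_pairs_spec : Claim_equal_two_body_num_elec_pairs := by
  intro num_elec1 num_elec2 _ hpre
  unfold Spec_two_body_num_elec_pairs
  obtain ⟨h1, h2⟩ := hpre
  obtain ⟨lo1, hlo1⟩ : ∃ m, PySem.List.min? num_elec1 (fun x => x) = some m := by
    cases hh : PySem.List.min? num_elec1 (fun x => x) with
    | none => exact absurd ((PySem.List.min?_eq_none_iff _ _).mp hh) h1
    | some m => exact ⟨m, rfl⟩
  obtain ⟨hi1, hhi1⟩ : ∃ m, PySem.List.max? num_elec1 (fun x => x) = some m := by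
    cases hh : PySem.List.max? num_elec1 (fun x => x) with
    | none => exact absurd ((PySem.List.max?_eq_none_iff _ _).mp hh) h1
    | some m => exact ⟨m, rfl⟩
  obtain ⟨lo2, hlo2⟩ : ∃ m, PySem.List.min? num_elec2 (fun x => x) = some m := by
    cases hh : PySem.List.min? num_elec2 (fun x => x) with
    | none => exact absurd ((PySem.List.min?_eq_none_iff _ _).mp hh) h2
    | some m => exact ⟨m, rfl⟩
  obtain ⟨hi2, hhi2⟩ : ∃ m, PySem.List.max? num_elec2 (fun x => x) = some m := by
    cases hh : PySem.List.max? num_elec2 (fun x => x) with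
    | none => exact absurd ((PySem.List.max?_eq_none_iff _ _).mp hh) h2
    | some m => exact ⟨m, rfl⟩
  -- close A's side
  have hA : two_body_num_elec_pairs num_elec1 num_elec2
      = (((PySem.List.pyRange (lo1 + lo2) (hi1 + hi2 + 1)).filter
            (fun s => !(pvSumPairs num_elec1 num_elec2 s).isEmpty)).map
          (pvSumPairs num_elec1 num_elec2),
         (PySem.List.pyRange (lo1 + lo2) (hi1 + hi2 + 1)).filter
            (fun s => !(pvSumPairs num_elec1 num_elec2 s).isEmpty)) := by
    simp only [two_body_num_elec_pairs, hlo1, hhi1, hlo2, hhi2]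
    rw [pvFoldlPairs (pvTmpA num_elec1 num_elec2) _ [] []]
    rw [show pvTmpA num_elec1 num_elec2 = pvSumPairs num_elec1 num_elec2 from
      funext (pvTmpA_eq num_elec1 num_elec2)]
    simp only [List.nil_append]
  -- close B's side
  have hm : ∀ x, x ∈ PySem.List.dedup num_elec2 ↔ x ∈ num_elec2 := fun x =>
    PySem.List.mem_dedup num_elec2 x
  have hnd : (PySem.List.dedup num_elec2).Nodup := PySem.List.nodup_dedup num_elec2
  have hgetD : ∀ s, ((pvPairs num_elec1 (PySem.List.dedup num_elec2)).foldl
        (fun d p => PySem.Dict.modify d p.1 [] (fun l => l ++ [p.2]))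
        (PySem.Dict.empty : PySem.Dict Int (List (Int × Int)))).getD s []
      = pvSumPairs num_elec1 num_elec2 s := by
    intro s
    rw [PySem.Dict.getD_foldl_modify_append]
    rw [pvPairsFilter num_elec1 num_elec2 _ s hnd hm]
    simp [pysem]
  have hkeysnodup := pvKeysNodup (pvPairs num_elec1 (PySem.List.dedup num_elec2))
  have hSnodup : ((PySem.List.pyRange (lo1 + lo2) (hi1 + hi2 + 1)).filter
      (fun s => !(pvSumPairs num_elec1 num_elec2 s).isEmpty)).Nodup :=
    (PySem.List.nodup_pyRange_one _ _).filter _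
  have hSpw : ((PySem.List.pyRange (lo1 + lo2) (hi1 + hi2 + 1)).filter
      (fun s => !(pvSumPairs num_elec1 num_elec2 s).isEmpty)).Pairwise (· < ·) :=
    (PySem.List.pairwise_lt_pyRange_one _ _).filter _
  have hmemS : ∀ s, s ∈ (PySem.List.pyRange (lo1 + lo2) (hi1 + hi2 + 1)).filter
      (fun s => !(pvSumPairs num_elec1 num_elec2 s).isEmpty)
      ↔ pvSumPairs num_elec1 num_elec2 s ≠ [] := by
    intro s
    simp only [List.mem_filter, PySem.List.mem_pyRange_one, Bool.not_eq_eq_eq_not, Bool.not_true,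
      List.isEmpty_eq_false_iff, ne_eq]
    constructor
    · rintro ⟨_, hne⟩; exact hne
    · intro hne
      refine ⟨?_, hne⟩
      obtain ⟨a, ha, hb⟩ := (pvSumPairs_ne_nil_iff num_elec1 num_elec2 s).mp hne
      have b1 := PySem.List.min?_isMin hlo1 a ha
      have b2 := PySem.List.max?_isMax hhi1 a ha
      have b3 := PySem.List.min?_isMin hlo2 _ hb
      have b4 := PySem.List.max?_isMax hhi2 _ hb
      simp only at b1 b2 b3 b4
      omega
  have hperm : ((PySem.List.pyRange (lo1 + lo2) (hi1 + hi2 + 1)).filter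
      (fun s => !(pvSumPairs num_elec1 num_elec2 s).isEmpty)).Perm
      ((pvPairs num_elec1 (PySem.List.dedup num_elec2)).foldl
        (fun d p => PySem.Dict.modify d p.1 [] (fun l => l ++ [p.2]))
        (PySem.Dict.empty : PySem.Dict Int (List (Int × Int)))).keys := by
    refine List.perm_of_nodup_nodup_toFinset_eq hSnodup hkeysnodup ?_
    ext x
    simp only [List.mem_toFinset, hmemS, pvKeysMem num_elec1 num_elec2 _ x hm]
  have hB : two_body_num_elec_pairs_alt num_elec1 num_elec2
      = (((PySem.List.pyRange (lo1 + lo2) (hi1 + hi2 + 1)).filter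
            (fun s => !(pvSumPairs num_elec1 num_elec2 s).isEmpty)).map
          (pvSumPairs num_elec1 num_elec2),
         (PySem.List.pyRange (lo1 + lo2) (hi1 + hi2 + 1)).filter
            (fun s => !(pvSumPairs num_elec1 num_elec2 s).isEmpty)) := by
    simp only [two_body_num_elec_pairs_alt]
    rw [pvNestedFoldl]
    rw [PySem.List.sorted_eq_of_perm_of_pairwise_lt _ _ _ hperm hSpw]
    simp only [hgetD]
  rw [hA, hB]
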